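-- pv_equiv track=rewrite | github.com/plutowang/solves_algorithms | codderbyte/solution.py | QuestionsMarks
-- ===== SOURCE A (Python) =====
-- def QuestionsMarks(str):
--     """Have the function QuestionsMarks(str) take the str string parameter,
--     which will contain single digit numbers, letters, and question marks,
--     and check if there are exactly 3 question marks between every pair of
--     two numbers that add up to 10. If so, then your program should return
--     the string true, otherwise it should return the string false.
--     If there aren't any two numbers that add up to 10 in the string,
--     then your program should return false as well.
--
--     For example: if str is "arrb6???4xxbl5???eee5" then your program should
--     return true because there are exactly 3 question marks between 6 and 4,
--     and 3 question marks between 5 and 5 at the end of the string.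
--     """
--     # code goes here
--     dig_idxs = [idx for idx, _ in enumerate(str) if str[idx].isdigit()]
--     has_ten = False
--     if len(dig_idxs) <= 1:
--         return 'false'
--     for i in range(len(dig_idxs) - 1):
--         d_x = dig_idxs[i]
--         d_y = dig_idxs[i+1]
--         if int(str[d_x]) + int(str[d_y]) == 10:
--             has_ten = True
--             if str[d_x:d_y:].count('?') != 3:
--                 return 'false'
--     return 'true' if has_ten else 'false'
-- ===== SOURCE B (Python) =====
-- def QuestionsMarks(str):
--     last_digit = None
--     qmarks = 0
--     has_ten = False
--     for c in str:
--         if c == '?':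
--             qmarks += 1
--         elif c.isdigit():
--             if last_digit is not None and int(last_digit) + int(c) == 10:
--                 if qmarks != 3:
--                     return 'false'
--                 has_ten = True
--             last_digit = c
--             qmarks = 0
--     return 'true' if has_ten else 'false'
-- ===== Notes on version B (the rewrite author's own statement) =====
-- stated objective: simpler
-- what changed: Replaces A's precomputed digit-index list with pairwise substring slicing/counting by a single pass over the string that maintains the last digit seen, a question-mark counter since that digit, and a has_ten flag.
import Mathlib
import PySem

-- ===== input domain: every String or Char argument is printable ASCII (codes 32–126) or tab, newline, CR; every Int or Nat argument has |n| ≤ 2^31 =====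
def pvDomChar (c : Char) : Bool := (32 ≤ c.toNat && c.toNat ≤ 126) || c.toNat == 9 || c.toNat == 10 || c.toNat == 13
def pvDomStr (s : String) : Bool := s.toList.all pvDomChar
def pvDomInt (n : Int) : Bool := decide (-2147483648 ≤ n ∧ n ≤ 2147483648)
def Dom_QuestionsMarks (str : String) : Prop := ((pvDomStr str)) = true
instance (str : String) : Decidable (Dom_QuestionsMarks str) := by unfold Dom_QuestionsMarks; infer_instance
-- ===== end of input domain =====

-- B replaces A's digit-index list + pairwise slice-counting by a single pass keeping the last digit,
-- a '?' counter and a has_ten flag (simpler decomposition, same O(n) cost).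


-- shared helper: int(c) for a single (digit) character; the default never fires on reachable inputs
def pvDigitVal (c : Char) : Int := (PySem.Int.ofChars? [c]).getD 0

-- ===== PORT A =====
-- the 'for i in range(len(dig_idxs) - 1)' loop of A, as structural recursion over adjacent pairs of dig_idxs
def pvALoop (s : List Char) : List Int → Bool → String
  | dx :: dy :: rest, hasTen =>
    if pvDigitVal (PySem.List.pyGetD s dx ' ') + pvDigitVal (PySem.List.pyGetD s dy ' ') == 10 then
      if PySem.Chars.count (PySem.List.slice s (some dx) (some dy)) ['?'] ≠ 3 then "false"
      else pvALoop s (dy :: rest) true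
    else pvALoop s (dy :: rest) hasTen
  | _, hasTen => if hasTen then "true" else "false"

def QuestionsMarks (str : String) : String :=
  let s := str.toList
  let digIdxs : List Int :=
    ((PySem.List.enumerate s 0).filter
      (fun p => PySem.Chars.isdigit (PySem.List.pyGetD s p.1 ' '))).map (·.1)
  if digIdxs.length ≤ 1 then "false" else pvALoop s digIdxs false

-- ===== PORT B =====
-- single pass: the last digit seen (if any), the number of '?' since it, and a has_ten flag
def pvBGo : List Char → Option Char → Nat → Bool → String
  | [], _, _, hasTen => if hasTen then "true" else "false"
  | c :: rest, last, qmarks, hasTen =>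
    if c == '?' then pvBGo rest last (qmarks + 1) hasTen
    else if PySem.Chars.isdigit c then
      match last with
      | some d =>
        if pvDigitVal d + pvDigitVal c == 10 then
          if qmarks ≠ 3 then "false" else pvBGo rest (some c) 0 true
        else pvBGo rest (some c) 0 hasTen
      | none => pvBGo rest (some c) 0 hasTen
    else pvBGo rest last qmarks hasTen

def QuestionsMarks_alt (str : String) : String := pvBGo str.toList none 0 false

-- ===== PRECONDITION & SPEC =====
def Spec_QuestionsMarks (str : String) (out : String) : Prop := out = QuestionsMarks_alt str
instance (str : String) (out : String) : Decidable (Spec_QuestionsMarks str out) := by unfold Spec_QuestionsMarks; infer_instance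

-- ===== CLAIM (what is proved, stated in full; the proofs are below) =====
def Claim_equal_QuestionsMarks : Prop := ∀ (str : String), Dom_QuestionsMarks str → Spec_QuestionsMarks str (QuestionsMarks str)

-- ===== LEMMAS AND PROOFS =====

-- the digit positions of a list, built structurally
def pvDIdx : List Char → List Nat
  | [] => []
  | c :: r => if PySem.Chars.isdigit c then 0 :: (pvDIdx r).map (· + 1) else (pvDIdx r).map (· + 1)

-- A's pair loop restated with Nat indices and plain drop/take/List.count
def pvNLoop (s : List Char) : List Nat → Bool → String
  | dx :: dy :: rest, h =>
    if pvDigitVal (s.getD dx ' ') + pvDigitVal (s.getD dy ' ') == 10 then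
      if ((s.drop dx).take (dy - dx)).count '?' ≠ 3 then "false"
      else pvNLoop s (dy :: rest) true
    else pvNLoop s (dy :: rest) h
  | _, h => if h then "true" else "false"

theorem pv_count_go_singleton (c : Char) (cs : List Char) (fuel acc : Nat) (hf : cs.length ≤ fuel) :
    PySem.Chars.count.go [c] fuel cs acc = acc + cs.count c := by
  induction cs generalizing fuel acc with
  | nil => cases fuel <;> simp [PySem.Chars.count.go]
  | cons x t ih =>
    cases fuel with
    | zero => simp at hf
    | succ f =>
      simp only [List.length_cons, Nat.succ_le_succ_iff] at hf
      rw [PySem.Chars.count.go]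
      by_cases hx : x = c
      · subst hx
        simp [List.isPrefixOf, ih _ _ hf]
        omega
      · have hpre : ([c].isPrefixOf (x :: t)) = false := by
          simp [List.isPrefixOf]; exact fun h => absurd h.symm hx
        simp [hpre, ih _ _ hf, hx]

-- str.count('?') on a slice is List.count
theorem pv_count_singleton (c : Char) (cs : List Char) :
    PySem.Chars.count cs [c] = cs.count c := by
  simp [PySem.Chars.count, pv_count_go_singleton c cs cs.length 0 le_rfl]

theorem pv_enum_filter (s : List Char) (n : Int) :
    ((PySem.List.enumerate s n).filter (fun p => PySem.Chars.isdigit p.2)).map (·.1)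
      = (pvDIdx s).map (fun (i : Nat) => n + (i : Int)) := by
  induction s generalizing n with
  | nil => simp only [PySem.List.enumerate_nil, List.filter_nil, List.map_nil, pvDIdx]
  | cons c r ih =>
    rw [PySem.List.enumerate_cons, List.filter_cons]
    by_cases hd : PySem.Chars.isdigit c
    · rw [if_pos (by simpa using hd), List.map_cons, ih]
      simp only [pvDIdx, hd, if_true, List.map_cons, List.map_map, List.cons.injEq]
      refine ⟨by push_cast; ring, List.map_congr_left fun i _ => ?_⟩
      simp only [Function.comp_apply]; push_cast; ring
    · have hd' : PySem.Chars.isdigit c = false := by simpa using hd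
      rw [if_neg (by simp [hd']), ih]
      simp only [pvDIdx, hd', Bool.false_eq_true, if_false, List.map_map]
      exact List.map_congr_left fun i _ => by simp only [Function.comp_apply]; push_cast; ring

-- the Int digit-index list A computes is pvDIdx, cast
theorem pv_digIdxs (s : List Char) :
    ((PySem.List.enumerate s 0).filter
        (fun p => PySem.Chars.isdigit (PySem.List.pyGetD s p.1 ' '))).map (·.1)
      = (pvDIdx s).map (fun (i : Nat) => (i : Int)) := by
  rw [List.filter_congr (q := fun p => PySem.Chars.isdigit p.2) ?_, pv_enum_filter s 0]
  · exact List.map_congr_left fun i _ => by ring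
  · intro p hp
    obtain ⟨k, hk, rfl⟩ := (PySem.List.mem_enumerate_iff _ _ _).mp hp
    have h0 : (0 + (k : Int)) = ((k : Nat) : Int) := by ring
    simp [h0, PySem.List.pyGetD_natCast, List.getD_eq_getElem?_getD, hk]

-- pvALoop with cast indices is pvNLoop
theorem pv_aloop_nloop (s : List Char) (idxs : List Nat) (h : Bool) :
    pvALoop s (idxs.map (fun (i : Nat) => (i : Int))) h = pvNLoop s idxs h := by
  induction idxs generalizing h with
  | nil => simp [pvALoop, pvNLoop]
  | cons dx rest ih =>
    cases rest with
    | nil => simp [pvALoop, pvNLoop]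
    | cons dy rest' =>
      simp only [List.map_cons, pvALoop, pvNLoop, PySem.List.pyGetD_natCast,
        PySem.List.slice_natCast, pv_count_singleton]
      split_ifs <;> first | rfl | exact ih true | exact ih h

-- shifting a common prefix off the string and off all indices
theorem pv_nloop_shift (pre t : List Char) (idxs : List Nat) (h : Bool) :
    pvNLoop (pre ++ t) (idxs.map (· + pre.length)) h = pvNLoop t idxs h := by
  induction idxs generalizing h with
  | nil => simp [pvNLoop]
  | cons dx rest ih =>
    cases rest with
    | nil => simp [pvNLoop]
    | cons dy rest' =>
      simp only [List.map_cons, pvNLoop]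
      have h1 : (pre ++ t).getD (dx + pre.length) ' ' = t.getD dx ' ' := by
        rw [List.getD_append_right] <;> simp
      have h2 : (pre ++ t).getD (dy + pre.length) ' ' = t.getD dy ' ' := by
        rw [List.getD_append_right] <;> simp
      have h3 : (pre ++ t).drop (dx + pre.length) = t.drop dx := by
        rw [List.drop_append, List.drop_eq_nil_of_le (by omega), List.nil_append]
        congr 1; omega
      have h4 : dy + pre.length - (dx + pre.length) = dy - dx := by omega
      rw [h1, h2, h3, h4]
      split_ifs <;> first | rfl | exact ih true | exact ih h

-- a digit character is not '?'
theorem pv_digit_ne_qm {c : Char} (hc : PySem.Chars.isdigit c = true) : c ≠ '?' := by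
  intro e; subst e; exact absurd hc (by decide)

-- main invariant: after a digit d with a digit-free stretch u behind it, A's pair loop is B's scan
theorem pv_P2 (r : List Char) : ∀ (u : List Char) (d : Char),
    PySem.Chars.isdigit d = true → (∀ x ∈ u, PySem.Chars.isdigit x = false) → ∀ h : Bool,
    pvNLoop (d :: (u ++ r)) (0 :: (pvDIdx r).map (fun i => i + (u.length + 1))) h
      = pvBGo r (some d) (u.count '?') h := by
  induction r with
  | nil => intro u d hd hu h; simp [pvDIdx, pvNLoop, pvBGo]
  | cons c r' ih =>
    intro u d hd hu h
    by_cases hdc : PySem.Chars.isdigit c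
    · -- c is the next digit
      have hcq : c ≠ '?' := pv_digit_ne_qm hdc
      have hlist : (0 :: (pvDIdx (c :: r')).map (fun i => i + (u.length + 1)))
          = 0 :: (u.length + 1) ::
              ((pvDIdx (c :: r')).map (fun i => i + (u.length + 1))).tail := by
        simp [pvDIdx, hdc]
      rw [hlist]
      have htail : ((pvDIdx (c :: r')).map (fun i => i + (u.length + 1))).tail
          = ((pvDIdx r').map (· + 1)).map (fun i => i + (u.length + 1)) := by
        simp [pvDIdx, hdc]
      simp only [pvNLoop]
      have hg0 : (d :: (u ++ c :: r')).getD 0 ' ' = d := rfl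
      have hg1 : (d :: (u ++ c :: r')).getD (u.length + 1) ' ' = c := by
        rw [List.getD_cons_succ, List.getD_append_right u (c :: r') ' ' u.length le_rfl]
        simp
      have hslice : (((d :: (u ++ c :: r')).drop 0).take (u.length + 1 - 0)).count '?'
          = u.count '?' := by
        have ht : (u ++ c :: r').take u.length = u := List.take_left
        simp only [List.drop_zero, Nat.sub_zero, List.take_succ_cons, ht, List.count_cons]
        simp [pv_digit_ne_qm hd]
      have hrec : ∀ h' : Bool,
          pvNLoop (d :: (u ++ c :: r'))
            ((u.length + 1) :: ((pvDIdx (c :: r')).map (fun i => i + (u.length + 1))).tail) h'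
          = pvBGo r' (some c) 0 h' := by
        intro h'
        rw [htail]
        have hmm : ((u.length + 1) :: ((pvDIdx r').map (· + 1)).map (fun i => i + (u.length + 1)))
            = (pvDIdx (c :: r')).map (· + (d :: u).length) := by
          simp [pvDIdx, hdc, List.map_map, Function.comp_def]
        have hs : (d :: (u ++ c :: r')) = (d :: u) ++ (c :: r') := by simp
        rw [hmm, hs, pv_nloop_shift (d :: u) (c :: r') (pvDIdx (c :: r')) h']
        have := ih [] c hdc (by simp) h'
        simpa [pvDIdx, hdc] using this
      rw [hg0, hg1, hslice]
      -- B side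
      have hbb : pvBGo (c :: r') (some d) (u.count '?') h
          = if pvDigitVal d + pvDigitVal c == 10 then
              (if u.count '?' ≠ 3 then "false" else pvBGo r' (some c) 0 true)
            else pvBGo r' (some c) 0 h := by
        simp [pvBGo, hcq, hdc]
      rw [hbb]
      split_ifs <;> first | rfl | exact hrec true | exact hrec h
    · -- c is not a digit: absorb it into u
      have hlist : (pvDIdx (c :: r')).map (fun i => i + (u.length + 1))
          = (pvDIdx r').map (fun i => i + ((u ++ [c]).length + 1)) := by
        have hdc' : PySem.Chars.isdigit c = false := by simpa using hdc
        simp only [pvDIdx, hdc', Bool.false_eq_true, if_false, List.map_map]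
        exact List.map_congr_left fun i _ => by simp [Function.comp]; omega
      have hs : d :: (u ++ c :: r') = d :: ((u ++ [c]) ++ r') := by simp
      have hu' : ∀ x ∈ u ++ [c], PySem.Chars.isdigit x = false := by
        intro x hx
        rcases List.mem_append.mp hx with hx | hx
        · exact hu x hx
        · simp at hx; subst hx; simpa using hdc
      rw [hlist, hs, ih (u ++ [c]) d hd hu' h]
      by_cases hq : c = '?'
      · subst hq
        have : (u ++ ['?']).count '?' = u.count '?' + 1 := by simp
        rw [this]
        simp [pvBGo]
      · have : (u ++ [c]).count '?' = u.count '?' := by simp [hq]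
        rw [this]
        have hdc' : PySem.Chars.isdigit c = false := by simpa using hdc
        simp [pvBGo, hq, hdc']

-- phase 1: scanning before the first digit
theorem pv_P1 (s : List Char) : ∀ (q : Nat),
    (if (pvDIdx s).length ≤ 1 then "false" else pvNLoop s (pvDIdx s) false)
      = pvBGo s none q false := by
  induction s with
  | nil => intro q; simp [pvDIdx, pvBGo]
  | cons c r ih =>
    intro q
    by_cases hdc : PySem.Chars.isdigit c
    · have hcq : c ≠ '?' := pv_digit_ne_qm hdc
      have hb : pvBGo (c :: r) none q false = pvBGo r (some c) 0 false := by
        simp [pvBGo, hcq, hdc]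
      have hp2 := pv_P2 r [] c hdc (by simp) false
      simp only [List.nil_append, List.length_nil, List.count_nil] at hp2
      rw [hb, ← hp2]
      have hd : pvDIdx (c :: r) = 0 :: (pvDIdx r).map (fun i => i + (0 + 1)) := by
        simp [pvDIdx, hdc]
      rw [hd]
      by_cases hnil : pvDIdx r = []
      · simp [hnil, pvNLoop]
      · have hpos := List.length_pos_of_ne_nil hnil
        have hlen : ¬ (0 :: (pvDIdx r).map (fun i => i + (0 + 1))).length ≤ 1 := by
          simp only [List.length_cons, List.length_map]; omega
        rw [if_neg hlen]
    · have hdc' : PySem.Chars.isdigit c = false := by simpa using hdc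
      have hd : pvDIdx (c :: r) = (pvDIdx r).map (· + 1) := by simp [pvDIdx, hdc']
      have hb : ∀ q' : Nat, pvBGo (c :: r) none q false = pvBGo r none q' false := by
        intro q'
        by_cases hq : c = '?'
        · subst hq; simp [pvBGo]; exact (ih (q + 1)).symm.trans (ih q')
        · simp [pvBGo, hq, hdc']; exact (ih q).symm.trans (ih q')
      rw [hd, hb q, ← ih q]
      by_cases hlen : (pvDIdx r).length ≤ 1
      · rw [if_pos (by simpa using hlen), if_pos hlen]
      · rw [if_neg (by simpa using hlen), if_neg hlen]
        simpa using pv_nloop_shift [c] r (pvDIdx r) false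

-- ===== VERDICT (by name: the statement is the Claim_ definition above) =====
theorem QuestionsMarks_spec : Claim_equal_QuestionsMarks := by
  intro str _
  unfold Spec_QuestionsMarks QuestionsMarks QuestionsMarks_alt
  simp only [pv_digIdxs, List.length_map, pv_aloop_nloop]
  exact pv_P1 str.toList 0
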